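-- pv_equiv track=rewrite | github.com/elad123456/Semester1-Python | EX2 TR5.py | org_str
-- ===== SOURCE A (Python) =====
-- def org_str(values:list)->list:
--     leng=len(values)
--     ezer=[]
--     search=True
--     for k in range(leng):
--         for i in range(len(values)):
--             if search:
--                 if not is_sign(values[i]):
--                     ezer.append(values[i])
--                     values.pop(i)
--                     search=not search
--                     break
--             else:
--                 if is_sign(values[i]):
--                     ezer.append(values[i])
--                     values.pop(i)
--                     search=not search
--                     break
--     return ezer
--
-- def is_sign(n:str)->bool:
--     if n=='*' or n=='+' or n=='-' or n=='/' or n=='//':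
--         return True
--     else:
--         return False
-- ===== SOURCE B (Python) =====
-- def is_sign(n: str) -> bool:
--     return n in ('*', '+', '-', '/', '//')
--
-- def org_str(values: list) -> list:
--     # Note: unlike A, this does not mutate `values`; equivalence is about the return value.
--     ns = [v for v in values if not is_sign(v)]
--     ss = [v for v in values if is_sign(v)]
--     res = []
--     i = 0
--     j = 0
--     take_ns = True
--     while True:
--         if take_ns:
--             if i >= len(ns):
--                 break
--             res.append(ns[i])
--             i += 1
--         else:
--             if j >= len(ss):
--                 break
--             res.append(ss[j])
--             j += 1
--         take_ns = not take_ns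
--     return res
-- ===== Notes on version B (the rewrite author's own statement) =====
-- stated objective: faster
-- what changed: Replaces A's quadratic rescan-and-pop loop by a single partition into non-sign and sign sublists followed by a linear two-index interleave; B does not mutate its argument (A empties it).
import Mathlib
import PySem

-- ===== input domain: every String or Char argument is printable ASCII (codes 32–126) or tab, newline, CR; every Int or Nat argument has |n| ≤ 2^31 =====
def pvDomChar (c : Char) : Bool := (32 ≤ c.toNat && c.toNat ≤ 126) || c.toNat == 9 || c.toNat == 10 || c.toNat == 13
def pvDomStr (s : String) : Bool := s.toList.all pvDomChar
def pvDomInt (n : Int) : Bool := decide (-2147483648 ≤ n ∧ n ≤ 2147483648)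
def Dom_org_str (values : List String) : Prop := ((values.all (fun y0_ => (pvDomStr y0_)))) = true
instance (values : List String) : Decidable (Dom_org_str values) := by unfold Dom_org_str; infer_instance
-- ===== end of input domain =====

-- B replaces A's quadratic rescan-and-pop interleave by a linear partition + two-index merge
-- (equivalence is about the return value only: the Python A empties `values` in place, B does not).

-- ===== PORT A =====
-- shared helper is_sign (identical in both Pythons)
def is_sign (n : String) : Bool :=
  n == "*" || n == "+" || n == "-" || n == "/" || n == "//"

-- inner `for i in range(len(values))` scan with `pop(i)` and `break`:
-- returns the first element satisfying p together with the list with it removed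
def scanA (p : String → Bool) : List String → Option (String × List String)
  | [] => none
  | x :: xs =>
    if p x then some (x, xs)
    else (scanA p xs).map (fun vr => (vr.1, x :: vr.2))

-- outer `for k in range(leng)` loop carrying (values, ezer, search)
def loopA : Nat → List String → List String → Bool → List String
  | 0, _, ezer, _ => ezer
  | k + 1, vals, ezer, search =>
    let p := if search then (fun s => !is_sign s) else is_sign
    match scanA p vals with
    | none => loopA k vals ezer search
    | some (v, rest) => loopA k rest (ezer ++ [v]) (!search)

def org_str (values : List String) : List String :=
  loopA values.length values [] true

-- ===== PORT B =====
-- the while-loop of Source B consuming ns/ss alternately, flag `take_ns`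
def weaveF : Bool → List String → List String → List String
  | true, [], _ => []
  | true, n :: ns, ss => n :: weaveF false ns ss
  | false, _, [] => []
  | false, ns, s :: ss => s :: weaveF true ns ss
  termination_by _ ns ss => ns.length + ss.length

def org_str_alt (values : List String) : List String :=
  let ns := values.filter (fun v => !is_sign v)
  let ss := values.filter (fun v => is_sign v)
  weaveF true ns ss

-- ===== PRECONDITION & SPEC =====
def Spec_org_str (values : List String) (out : List String) : Prop := out = org_str_alt values
instance (values : List String) (out : List String) : Decidable (Spec_org_str values out) := by unfold Spec_org_str; infer_instance

-- ===== CLAIM (what is proved, stated in full; the proofs are below) =====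
def Claim_equal_org_str : Prop := ∀ (values : List String), Dom_org_str values → Spec_org_str values (org_str values)

-- ===== LEMMAS AND PROOFS =====

-- scanA finds nothing iff no element satisfies p
lemma scanA_eq_none {p : String → Bool} {l : List String} :
    scanA p l = none ↔ l.filter p = [] := by
  induction l with
  | nil => simp [scanA]
  | cons x xs ih =>
    by_cases hx : p x <;> simp [scanA, hx, ih, Option.map_eq_none_iff]

lemma scanA_some {p : String → Bool} {l l' : List String} {v : String}
    (h : scanA p l = some (v, l')) :
    l.filter p = v :: l'.filter p ∧
    (∀ q : String → Bool, (∀ a, q a = !p a) → l.filter q = l'.filter q) ∧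
    l'.length + 1 = l.length := by
  induction l generalizing l' v with
  | nil => simp [scanA] at h
  | cons x xs ih =>
    by_cases hx : p x
    · simp only [scanA, if_pos hx, Option.some.injEq, Prod.mk.injEq] at h
      obtain ⟨rfl, rfl⟩ := h
      refine ⟨by simp [hx], fun q hq => ?_, by simp⟩
      have : q x = false := by simp [hq, hx]
      simp [this]
    · simp only [scanA, if_neg hx, Option.map_eq_some_iff] at h
      obtain ⟨⟨w, r⟩, hw, heq⟩ := h
      obtain ⟨rfl, rfl⟩ : w = v ∧ x :: r = l' := by
        simpa [Prod.ext_iff] using heq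
      obtain ⟨h1, h2, h3⟩ := ih hw
      refine ⟨by simp [hx, h1], fun q hq => ?_, by simp [← h3]⟩
      have hpx : p x = false := by simpa using hx
      have hqx : q x = true := by simp [hq, hpx]
      simp [hqx, h2 q hq]

-- if the needed kind is absent, the remaining outer iterations change nothing
lemma loopA_stuck (fuel : Nat) (vals ezer : List String) (search : Bool)
    (h : scanA (if search then (fun s => !is_sign s) else is_sign) vals = none) :
    loopA fuel vals ezer search = ezer := by
  induction fuel with
  | zero => rfl
  | succ k ih => simp only [loopA, h]; exact ih

-- main invariant: with enough fuel the A-loop produces ezer ++ the interleave of the filters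
lemma loopA_eq (fuel : Nat) (vals ezer : List String) (search : Bool)
    (h : vals.length ≤ fuel) :
    loopA fuel vals ezer search =
      ezer ++ weaveF search (vals.filter (fun v => !is_sign v)) (vals.filter (fun v => is_sign v)) := by
  induction fuel generalizing vals ezer search with
  | zero =>
    have : vals = [] := List.length_eq_zero_iff.mp (Nat.le_zero.mp h)
    subst this
    cases search <;> simp [loopA, weaveF]
  | succ k ih =>
    cases search with
    | true =>
      cases hscan : scanA (fun s => !is_sign s) vals with
      | none =>
        have hf : vals.filter (fun v => !is_sign v) = [] := scanA_eq_none.mp hscan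
        rw [loopA_stuck (k + 1) vals ezer true (by simpa using hscan), hf]
        simp [weaveF]
      | some vr =>
        obtain ⟨v, rest⟩ := vr
        obtain ⟨h1, h2, h3⟩ := scanA_some hscan
        have hlen : rest.length ≤ k := by omega
        have hsign : vals.filter (fun v => is_sign v) = rest.filter (fun v => is_sign v) :=
          h2 (fun v => is_sign v) (fun a => by simp)
        have hstep : loopA (k + 1) vals ezer true = loopA k rest (ezer ++ [v]) false := by
          simp [loopA, hscan]
        rw [hstep, ih rest (ezer ++ [v]) false hlen, h1, hsign]
        simp [weaveF]
    | false =>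
      cases hscan : scanA is_sign vals with
      | none =>
        have hf : vals.filter (fun v => is_sign v) = [] := scanA_eq_none.mp (by simpa using hscan)
        rw [loopA_stuck (k + 1) vals ezer false (by simpa using hscan), hf]
        cases hns : vals.filter (fun v => !is_sign v) <;> simp [weaveF]
      | some vr =>
        obtain ⟨v, rest⟩ := vr
        obtain ⟨h1, h2, h3⟩ := scanA_some hscan
        have hlen : rest.length ≤ k := by omega
        have hnons : vals.filter (fun v => !is_sign v) = rest.filter (fun v => !is_sign v) :=
          h2 (fun v => !is_sign v) (fun a => rfl)
        have hstep : loopA (k + 1) vals ezer false = loopA k rest (ezer ++ [v]) true := by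
          simp [loopA, hscan]
        rw [hstep, ih rest (ezer ++ [v]) true hlen, hnons]
        have h1' : vals.filter (fun v => is_sign v) = v :: rest.filter (fun v => is_sign v) := by
          simpa using h1
        rw [h1']
        cases hns : rest.filter (fun v => !is_sign v) <;> simp [weaveF]

-- ===== VERDICT (by name: the statement is the Claim_ definition above) =====
theorem org_str_spec : Claim_equal_org_str := by
  intro values _
  unfold Spec_org_str org_str org_str_alt
  exact loopA_eq values.length values [] true (Nat.le_refl _)
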